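-- pv_equiv track=rewrite | github.com/spirali/nelsie | python/nelsie/steps.py | _expand_list
-- ===== SOURCE A (Python) =====
-- from typing import TypeVar, Generic, Sequence
--
-- def _expand_list(seq: Sequence, open: bool) -> (list[bool], int):
--     if not seq:
--         return [False]
--     for value in seq:
--         if not isinstance(value, int):
--             raise ValueError("Step definition by sequence has to contains integers")
--         if value < 1:
--             raise ValueError("Step cannot be a zero or negative integer")
--     max_value = max(seq)
--     result = [False] * (max_value + (1 if not open else 0))
--     for value in seq:
--         result[value - 1] = True
--     return result, max_value
-- ===== SOURCE B (Python) =====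
-- def _expand_list(seq, open_):
--     if not seq:
--         return [False]
--     for value in seq:
--         if not isinstance(value, int):
--             raise ValueError("Step definition by sequence has to contains integers")
--         if value < 1:
--             raise ValueError("Step cannot be a zero or negative integer")
--     result = []
--     prev = 0
--     for v in sorted(set(seq)):
--         result.extend([False] * (v - 1 - prev))
--         result.append(True)
--         prev = v
--     if not open_:
--         result.append(False)
--     return result, prev
-- ===== Notes on version B (the rewrite author's own statement) =====
-- stated objective: alternative
-- what changed: Replaces A's scatter into a preallocated False array with a sort-then-scan run-length construction: sort the distinct values and emit each gap of Falses followed by a True, tracking the previous value which ends up as the returned maximum (no max() call, no preallocation).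
-- outside the precondition, e.g. on _expand_list([], False): A returns (False,), B returns (False,); on _expand_list([0], False): A raises ValueError, B raises ValueError
import Mathlib
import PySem

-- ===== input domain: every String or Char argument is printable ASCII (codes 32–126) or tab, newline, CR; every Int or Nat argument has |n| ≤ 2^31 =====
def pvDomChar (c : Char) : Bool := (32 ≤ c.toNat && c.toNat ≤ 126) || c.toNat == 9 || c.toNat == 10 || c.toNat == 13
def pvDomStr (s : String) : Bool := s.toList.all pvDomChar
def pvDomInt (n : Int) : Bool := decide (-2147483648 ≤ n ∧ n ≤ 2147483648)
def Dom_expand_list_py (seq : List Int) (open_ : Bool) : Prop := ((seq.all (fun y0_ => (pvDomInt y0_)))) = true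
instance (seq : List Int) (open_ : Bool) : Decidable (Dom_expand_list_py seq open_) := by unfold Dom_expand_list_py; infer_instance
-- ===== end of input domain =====

-- B replaces A's scatter into a preallocated False array with a sort-then-scan run-length
-- construction over the distinct values (alternative algorithm, similar cost).


-- ===== PORT A =====
-- Literal port of A: the two validation raises are outside Pre_; on empty seq Python returns
-- the bare list [False] (not a pair), also outside Pre_, so the branch value here is arbitrary.
def expand_list_py (seq : List Int) (open_ : Bool) : List Bool × Int :=
  if seq.isEmpty then ([false], 0)
  else
    let max_value := (PySem.List.max? seq (fun x => x)).getD 0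
    let result := List.replicate (max_value + (if open_ = false then 1 else 0)).toNat false
    let result := seq.foldl (fun r v => r.set (v - 1).toNat true) result
    (result, max_value)

-- ===== PORT B =====
-- B's run-emitting loop body: append the gap of Falses before v, then a True, remember v.
def expand_list_py_altStep (st : List Bool × Int) (v : Int) : List Bool × Int :=
  (st.1 ++ List.replicate (v - 1 - st.2).toNat false ++ [true], v)

def expand_list_py_alt (seq : List Int) (open_ : Bool) : List Bool × Int :=
  if seq.isEmpty then ([false], 0)
  else
    let vals := PySem.List.sorted (PySem.Set.ofList seq) (fun x => x) false
    let st := vals.foldl expand_list_py_altStep ([], 0)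
    let result := if open_ then st.1 else st.1 ++ [false]
    (result, st.2)

-- ===== PRECONDITION & SPEC =====
-- Pre_ excludes the empty sequence, where A returns the bare list [False] instead of a
-- (list, int) pair (not a value of the declared return type), and sequences containing a
-- value < 1, where A raises ValueError.
def Pre_expand_list_py (seq : List Int) (open_ : Bool) : Prop :=
  seq ≠ [] ∧ ∀ v ∈ seq, 1 ≤ v
instance (seq : List Int) (open_ : Bool) : Decidable (Pre_expand_list_py seq open_) := by
  unfold Pre_expand_list_py; infer_instance
def pvWitness_expand_list_py : List Int × Bool := ([1, 3], false)

def Spec_expand_list_py (seq : List Int) (open_ : Bool) (out : List Bool × Int) : Prop := out = expand_list_py_alt seq open_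
instance (seq : List Int) (open_ : Bool) (out : List Bool × Int) : Decidable (Spec_expand_list_py seq open_ out) := by unfold Spec_expand_list_py; infer_instance

-- ===== CLAIM (what is proved, stated in full; the proofs are below) =====
def Claim_equal_expand_list_py : Prop := ∀ (seq : List Int) (open_ : Bool), Dom_expand_list_py seq open_ → Pre_expand_list_py seq open_ → Spec_expand_list_py seq open_ (expand_list_py seq open_)

-- ===== LEMMAS AND PROOFS =====

-- one write: element m of l.set n true
lemma getElem?_set_true (l : List Bool) (n m : Nat) :
    (l.set n true)[m]? = if n = m ∧ n < l.length then some true else l[m]? := by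
  rw [List.getElem?_set]
  by_cases he : n = m
  · subst he
    by_cases hlt : n < l.length
    · rw [if_pos rfl, if_pos hlt, if_pos ⟨rfl, hlt⟩]
    · rw [if_pos rfl, if_neg hlt, if_neg (fun h => hlt h.2)]
      exact (List.getElem?_eq_none_iff.mpr (by omega)).symm
  · rw [if_neg he, if_neg (fun h => he h.1)]

-- characterisation of A's scatter loop: position i ends true iff some v writes it, else unchanged
lemma scatter_getElem? (seq : List Int) (init : List Bool) (i : Nat) :
    (seq.foldl (fun r v => r.set (v - 1).toNat true) init)[i]? =
      if ((seq.any (fun v => (v - 1).toNat == i)) = true ∧ i < init.length) then some true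
      else init[i]? := by
  induction seq generalizing init with
  | nil => simp
  | cons v t ih =>
    simp only [List.foldl_cons]
    rw [ih (init.set (v - 1).toNat true)]
    rw [List.length_set, getElem?_set_true]
    by_cases ht : (t.any (fun v => (v - 1).toNat == i)) = true
    · by_cases hl : i < init.length
      · rw [if_pos ⟨ht, hl⟩, if_pos ⟨by rw [List.any_cons, ht, Bool.or_true], hl⟩]
      · rw [if_neg (by rintro ⟨-, h2⟩; exact hl h2),
            if_neg (by rintro ⟨h1, h2⟩; omega),
            if_neg (by rintro ⟨-, h2⟩; exact hl h2)]
    · rw [if_neg (by rintro ⟨h1, -⟩; exact ht h1)]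
      by_cases hv : (v - 1).toNat = i
      · by_cases hl : i < init.length
        · rw [if_pos ⟨hv, by omega⟩,
              if_pos ⟨by rw [List.any_cons]; rw [beq_iff_eq.mpr hv, Bool.true_or], hl⟩]
        · rw [if_neg (by rintro ⟨h1, h2⟩; omega), if_neg (by rintro ⟨-, h2⟩; exact hl h2)]
      · rw [if_neg (by rintro ⟨h1, -⟩; exact hv h1),
            if_neg (by
              rintro ⟨hc, -⟩
              rw [List.any_cons, beq_eq_false_iff_ne.mpr hv, Bool.false_or] at hc
              exact ht hc)]

-- characterisation of B's run-emitting fold over a strictly increasing list of values > p0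
lemma runs_spec (L : List Int) (r0 : List Bool) (p0 : Int)
    (hp0 : 0 ≤ p0) (hlen : (r0.length : Int) = p0)
    (hchain : L.Pairwise (· < ·)) (hgt : ∀ v ∈ L, p0 < v) :
    p0 ≤ (L.foldl expand_list_py_altStep (r0, p0)).2 ∧
    ((L.foldl expand_list_py_altStep (r0, p0)).1.length : Int) = (L.foldl expand_list_py_altStep (r0, p0)).2 ∧
    (∀ x ∈ L, x ≤ (L.foldl expand_list_py_altStep (r0, p0)).2) ∧
    ((L.foldl expand_list_py_altStep (r0, p0)).2 ∈ L ∨ (L.foldl expand_list_py_altStep (r0, p0)).2 = p0) ∧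
    (∀ i : Nat, (L.foldl expand_list_py_altStep (r0, p0)).1[i]? =
      if (i : Int) < p0 then r0[i]?
      else if (i : Int) < (L.foldl expand_list_py_altStep (r0, p0)).2 then
        some (decide ((i : Int) + 1 ∈ L)) else none) := by
  induction L generalizing r0 p0 with
  | nil =>
    refine ⟨le_refl _, hlen, by simp, Or.inr rfl, ?_⟩
    intro i
    simp only [List.foldl_nil]
    by_cases hi : (i : Int) < p0
    · rw [if_pos hi]
    · rw [if_neg hi, if_neg hi, List.getElem?_eq_none_iff.mpr (by omega)]
  | cons v t ih =>
    have hpv : p0 < v := hgt v (List.mem_cons_self)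
    simp only [List.foldl_cons]
    set r1 := r0 ++ List.replicate (v - 1 - p0).toNat false ++ [true] with hr1
    have hstep : expand_list_py_altStep (r0, p0) v = (r1, v) := rfl
    simp only [hstep]
    have hlen1 : ((r1 : List Bool).length : Int) = v := by
      simp only [hr1, List.length_append, List.length_replicate, List.length_cons,
        List.length_nil]
      omega
    have hchain' : t.Pairwise (· < ·) := hchain.tail
    have hgt' : ∀ x ∈ t, v < x := fun x hx => (List.pairwise_cons.mp hchain).1 x hx
    obtain ⟨h1, h2, h3, h4, h5⟩ := ih r1 v (by omega) hlen1 hchain' hgt'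
    refine ⟨by omega, h2, ?_, ?_, ?_⟩
    · intro x hx
      rcases List.mem_cons.mp hx with rfl | hx
      · exact h1
      · exact h3 x hx
    · rcases h4 with h | h
      · exact Or.inl (List.mem_cons_of_mem _ h)
      · exact Or.inl (by rw [h]; exact List.mem_cons_self)
    · intro i
      rw [h5 i]
      -- value of r1 at i
      have hr1get : ∀ i : Nat, (i : Int) < v → r1[i]? =
          if (i : Int) < p0 then r0[i]?
          else if (i : Int) = v - 1 then some true else some false := by
        intro j hj
        by_cases hjp : (j : Int) < p0
        · rw [if_pos hjp, hr1, List.append_assoc, List.getElem?_append_left (by omega)]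
        · rw [if_neg hjp, hr1, List.append_assoc,
              List.getElem?_append_right (by omega : r0.length ≤ j)]
          by_cases hje : (j : Int) = v - 1
          · rw [if_pos hje,
                List.getElem?_append_right (by simp [List.length_replicate]; omega)]
            simp only [List.length_replicate]
            rw [show j - r0.length - (v - 1 - p0).toNat = 0 by omega]
            rfl
          · rw [if_neg hje,
                List.getElem?_append_left (by simp [List.length_replicate]; omega),
                List.getElem?_replicate, if_pos (by omega)]
      by_cases hip : (i : Int) < p0
      · rw [if_pos hip, if_pos (by omega), hr1get i (by omega), if_pos hip]
      · rw [if_neg hip]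
        by_cases hiv : (i : Int) < v
        · rw [if_pos hiv, hr1get i hiv, if_neg hip,
              if_pos (show (i:Int) < (t.foldl expand_list_py_altStep (r1, v)).2 by omega)]
          by_cases hie : (i : Int) = v - 1
          · rw [if_pos hie]
            have : ((i : Int) + 1 ∈ v :: t) := by
              rw [List.mem_cons]; exact Or.inl (by omega)
            simp [this]
          · rw [if_neg hie]
            have hnot : ¬ ((i : Int) + 1 ∈ v :: t) := by
              rw [List.mem_cons]
              rintro (h | h)
              · omega
              · have := hgt' _ h; omega
            simp [hnot]
        · rw [if_neg hiv]
          by_cases his : (i : Int) < (t.foldl expand_list_py_altStep (r1, v)).2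
          · rw [if_pos his, if_pos his]
            have hne : ¬ ((i : Int) + 1 = v) := by omega
            congr 1
            simp only [List.mem_cons, decide_eq_decide]
            constructor
            · exact fun h => Or.inr h
            · rintro (h | h)
              · exact absurd h hne
              · exact h
          · rw [if_neg his, if_neg his]

theorem expand_list_py_spec : Claim_equal_expand_list_py := by
  intro seq open_ _hdom hpre
  obtain ⟨hne, hpos⟩ := hpre
  unfold Spec_expand_list_py expand_list_py expand_list_py_alt
  have hne' : seq.isEmpty = false := by simpa [List.isEmpty_iff] using hne
  simp only [hne', Bool.false_eq_true, if_false]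
  set M := (PySem.List.max? seq (fun x => x)).getD 0 with hM
  obtain ⟨m, hm⟩ : ∃ m, PySem.List.max? seq (fun x => x) = some m := by
    rcases h : PySem.List.max? seq (fun x => x) with _ | m
    · exact absurd ((PySem.List.max?_eq_none_iff seq (fun x => x)).mp h) hne
    · exact ⟨m, rfl⟩
  have hMseq : M ∈ seq := by rw [hM, hm]; exact PySem.List.max?_mem hm
  have hMmax : ∀ y ∈ seq, y ≤ M := by
    intro y hy
    rw [hM, hm]
    exact PySem.List.max?_isMax hm y hy
  have hM1 : 1 ≤ M := hpos M hMseq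
  set vals := PySem.List.sorted (PySem.Set.ofList seq) (fun x => x) false with hvals
  have hmemv : ∀ x : Int, x ∈ vals ↔ x ∈ seq := by
    intro x
    rw [hvals, PySem.List.mem_sorted]
    exact PySem.Set.mem_ofList _ _
  have hchain : vals.Pairwise (· < ·) := PySem.List.sorted_ofList_pairwise_lt seq
  obtain ⟨h1, h2, h3, h4, h5⟩ :=
    runs_spec vals [] 0 (le_refl 0) (by simp) hchain
      (fun v hv => lt_of_lt_of_le (by norm_num) (hpos v ((hmemv v).mp hv)))
  set st := vals.foldl expand_list_py_altStep ([], 0) with hst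
  -- the running previous value ends at the maximum
  have hstM : st.2 = M := by
    rcases h4 with h | h
    · have hle : st.2 ≤ M := hMmax _ ((hmemv _).mp h)
      have hge : M ≤ st.2 := h3 M ((hmemv M).mpr hMseq)
      omega
    · have := h3 M ((hmemv M).mpr hMseq)
      omega
  refine Prod.ext ?_ hstM.symm
  dsimp only
  have hsize : M + (if open_ = false then (1:Int) else 0) =
      M + (if open_ then 0 else 1) := by cases open_ <;> rfl
  rw [hsize]
  set size := M + (if open_ then (0:Int) else 1) with hsz
  have hif : (0:Int) ≤ if open_ then 0 else 1 := by cases open_ <;> norm_num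
  have hsnn : 0 ≤ size := by omega
  have hstlen : (st.1.length : Int) = M := by rw [h2, hstM]
  -- pointwise comparison of the two result lists
  apply List.ext_getElem?
  intro i
  rw [scatter_getElem?, List.length_replicate]
  have hany : (seq.any (fun v => (v - 1).toNat == i)) = true ↔ ((i : Int) + 1 ∈ vals) := by
    rw [List.any_eq_true]
    constructor
    · rintro ⟨v, hv, hb⟩
      have h1v := hpos v hv
      have h2v := beq_iff_eq.mp hb
      exact (hmemv _).mpr (by
        have : v = (i : Int) + 1 := by omega
        exact this ▸ hv)
    · intro hmem
      exact ⟨(i : Int) + 1, (hmemv _).mp hmem, beq_iff_eq.mpr (by omega)⟩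
  have hBget : (if open_ then st.1 else st.1 ++ [false])[i]? =
      if (i : Int) < M then some (decide ((i : Int) + 1 ∈ vals))
      else if open_ = false ∧ (i : Int) = M then some false else none := by
    have hmid := h5 i
    rw [if_neg (by omega)] at hmid
    rw [hstM] at hmid
    cases open_ with
    | false =>
      simp only [Bool.false_eq_true, if_false]
      by_cases hiM : (i : Int) < M
      · rw [List.getElem?_append_left (by omega), hmid, if_pos hiM, if_pos hiM]
      · rw [if_neg hiM, List.getElem?_append_right (by omega : st.1.length ≤ i)]
        by_cases hie : (i : Int) = M
        · rw [if_pos (c := True ∧ (i : Int) = M) ⟨trivial, hie⟩,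
              show i - st.1.length = 0 by omega]
          rfl
        · rw [if_neg (c := True ∧ (i : Int) = M) (by rintro ⟨-, h⟩; exact hie h),
              List.getElem?_eq_none_iff.mpr (by simp; omega)]
    | true =>
      simp only [if_true]
      rw [hmid]
      by_cases hiM : (i : Int) < M
      · rw [if_pos hiM, if_pos hiM]
      · rw [if_neg hiM, if_neg hiM, if_neg (by simp)]
  rw [hBget]
  by_cases hiM : (i : Int) < M
  · rw [if_pos hiM]
    by_cases ha : (seq.any (fun v => (v - 1).toNat == i)) = true
    · rw [if_pos ⟨ha, by rw [hsz]; cases open_ <;> simp <;> omega⟩]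
      have : ((i : Int) + 1 ∈ vals) := hany.mp ha
      simp [this]
    · rw [if_neg (by rintro ⟨h, -⟩; exact ha h), List.getElem?_replicate,
          if_pos (by omega)]
      have : ¬ ((i : Int) + 1 ∈ vals) := fun h => ha (hany.mpr h)
      simp [this]
  · -- i ≥ M : no v writes position i (v ≤ M gives (v-1).toNat < M.toNat ≤ i)
    have hnoany : ¬ (seq.any (fun v => (v - 1).toNat == i)) = true := by
      rw [List.any_eq_true]
      rintro ⟨v, hv, hb⟩
      have h1v := hpos v hv
      have h2v := hMmax v hv
      have := beq_iff_eq.mp hb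
      omega
    rw [if_neg (by rintro ⟨h, -⟩; exact hnoany h), List.getElem?_replicate]
    cases open_ with
    | false =>
      rw [if_neg hiM]
      by_cases hie : (i : Int) = M
      · rw [if_pos (show i < size.toNat by
            rw [hsz]; simp only [Bool.false_eq_true, if_false]; omega),
          if_pos (c := false = false ∧ (i : Int) = M) ⟨rfl, hie⟩]
      · rw [if_neg (c := false = false ∧ (i : Int) = M) (by rintro ⟨-, h⟩; exact hie h),
          if_neg (show ¬ i < size.toNat by
            rw [hsz]; simp only [Bool.false_eq_true, if_false]; omega)]
    | true =>
      rw [if_neg hiM, if_neg (show ¬ (true = false ∧ (i : Int) = M) by simp),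
        if_neg (show ¬ i < size.toNat by rw [hsz]; simp; omega)]
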